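-- pv_equiv track=rewrite | github.com/Masaneh567/Nurikabe | Final Nurikabe solver.py | clues_separated_by_one
-- ===== SOURCE A (Python) =====
-- def clues_separated_by_one(puzzle,n):
--
--
--     for row in range(n):
--         for col in range(1, n-1):
--             if puzzle[row][col] == -1:  # Check if the cell is undetermined and see if it seperates clues horizontally.
--                 if puzzle[row][col-1] > 0 and puzzle[row][col+1] > 0:
--                     puzzle[row][col] = 0
--
--     # Vertical check
--     for col in range(n):
--         for row in range(1, n-1):
--             if puzzle[row][col] == -1:
--                 if puzzle[row-1][col] > 0 and puzzle[row+1][col] > 0: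
--                     puzzle[row][col] = 0
--
--     return puzzle
-- ===== SOURCE B (Python) =====
-- def clues_separated_by_one(puzzle, n):
--     # Single fused scan against a precomputed immutable clue mask (mutates puzzle in place, like A).
--     if n >= 3:
--         clue = [[v > 0 for v in row[:n]] for row in puzzle[:n]]
--         for r in range(n):
--             for c in range(n):
--                 if puzzle[r][c] == -1 and (
--                     (0 < c < n - 1 and clue[r][c - 1] and clue[r][c + 1])
--                     or (0 < r < n - 1 and clue[r - 1][c] and clue[r + 1][c])
--                 ):
--                     puzzle[r][c] = 0
--     return puzzle
-- ===== Notes on version B (the rewrite author's own statement) =====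
-- stated objective: alternative
-- what changed: A's two sequential full-grid passes (horizontal then vertical, each re-reading the mutated grid) are replaced by one fused scan that tests both axes at once against a clue mask precomputed from the original grid; this is safe because updates only turn -1 into 0, which no '> 0' neighbour test observes.
-- outside the precondition, e.g. on clues_separated_by_one([[1, 1], [1, 1, 1], [1, 1]], 3): A returns [[1, 1], [1, 1, 1], [1, 1]], B raises IndexError
import Mathlib
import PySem

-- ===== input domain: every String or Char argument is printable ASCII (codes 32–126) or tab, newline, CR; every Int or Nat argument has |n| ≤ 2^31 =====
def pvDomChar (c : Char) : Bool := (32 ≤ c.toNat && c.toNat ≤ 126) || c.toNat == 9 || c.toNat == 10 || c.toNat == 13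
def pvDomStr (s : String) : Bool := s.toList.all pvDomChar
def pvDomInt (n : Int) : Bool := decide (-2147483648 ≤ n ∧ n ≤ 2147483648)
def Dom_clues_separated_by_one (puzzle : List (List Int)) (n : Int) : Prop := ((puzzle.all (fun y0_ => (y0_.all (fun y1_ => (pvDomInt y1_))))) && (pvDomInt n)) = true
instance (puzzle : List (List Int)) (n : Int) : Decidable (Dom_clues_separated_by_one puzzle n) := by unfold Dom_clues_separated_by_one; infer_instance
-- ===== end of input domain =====

-- B replaces A's two sequential axis passes by one fused scan testing both axes against a
-- precomputed immutable clue mask (objective: alternative decomposition, same asymptotic cost).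
-- Both the Python A and the Python B mutate `puzzle` in place and return it; the equivalence
-- proved here is about the returned value.

-- B replaces A's two sequential axis passes (horizontal then vertical) by one fused scan that
-- tests both axes against a precomputed immutable clue mask (objective: alternative
-- decomposition, similar cost). Both Pythons mutate `puzzle` in place and return it; the
-- equivalence proved here is about the returned value.

-- ===== PORT A =====
-- puzzle[row][col] read; exact for the nonnegative indices the loops produce (in range under Pre_)
def pvGetC (g : List (List Int)) (r c : Int) : Int :=
  PySem.List.pyGetD (PySem.List.pyGetD g r []) c 0

-- puzzle[row][col] = 0 ; exact for the nonnegative in-range indices the loops produce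
def pvSetC (g : List (List Int)) (r c : Int) : List (List Int) :=
  g.modify r.toNat (fun row => row.set c.toNat 0)

def clues_separated_by_one (puzzle : List (List Int)) (n : Int) : List (List Int) :=
  let g1 := (PySem.List.pyRange 0 n 1).foldl (fun g row =>
    (PySem.List.pyRange 1 (n - 1) 1).foldl (fun g col =>
      if pvGetC g row col = -1 then
        if 0 < pvGetC g row (col - 1) ∧ 0 < pvGetC g row (col + 1) then pvSetC g row col else g
      else g) g) puzzle
  (PySem.List.pyRange 0 n 1).foldl (fun g col =>
    (PySem.List.pyRange 1 (n - 1) 1).foldl (fun g row =>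
      if pvGetC g row col = -1 then
        if 0 < pvGetC g (row - 1) col ∧ 0 < pvGetC g (row + 1) col then pvSetC g row col else g
      else g) g) g1

-- ===== PORT B =====
-- clue = [[v > 0 for v in row[:n]] for row in puzzle[:n]]
def pvClueGrid (puzzle : List (List Int)) (n : Int) : List (List Bool) :=
  (PySem.List.slice puzzle none (some n)).map (fun row =>
    (PySem.List.slice row none (some n)).map (fun v => decide (0 < v)))

-- clue[r][c] read (defaults never reached: B only indexes inside the n×n square)
def pvClueAt (clue : List (List Bool)) (r c : Int) : Bool :=
  PySem.List.pyGetD (PySem.List.pyGetD clue r []) c false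

def clues_separated_by_one_alt (puzzle : List (List Int)) (n : Int) : List (List Int) :=
  if 3 ≤ n then
    let clue := pvClueGrid puzzle n
    (PySem.List.pyRange 0 n 1).foldl (fun g r =>
      (PySem.List.pyRange 0 n 1).foldl (fun g c =>
        if pvGetC g r c = -1 ∧
            ((0 < c ∧ c < n - 1 ∧ pvClueAt clue r (c - 1) ∧ pvClueAt clue r (c + 1)) ∨
             (0 < r ∧ r < n - 1 ∧ pvClueAt clue (r - 1) c ∧ pvClueAt clue (r + 1) c))
        then pvSetC g r c else g) g) puzzle
  else puzzle

-- ===== PRECONDITION & SPEC =====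
-- Pre_ requires the first n rows to exist with at least n columns (nothing for n < 3, where
-- neither program touches the grid). This excludes some ragged grids on which A happens to
-- return only because a missing neighbour read is skipped behind a failing '== -1' test;
-- B reads every cell of the n×n square and raises IndexError there.
def Pre_clues_separated_by_one (puzzle : List (List Int)) (n : Int) : Prop :=
  3 ≤ n → (n ≤ (puzzle.length : Int) ∧ ∀ row ∈ puzzle.take n.toNat, n ≤ (row.length : Int))
instance (puzzle : List (List Int)) (n : Int) : Decidable (Pre_clues_separated_by_one puzzle n) := by
  unfold Pre_clues_separated_by_one; infer_instance

def pvWitness_clues_separated_by_one : List (List Int) × Int :=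
  ([[1, -1, 1], [-1, -1, -1], [1, -1, 1]], 3)

def Spec_clues_separated_by_one (puzzle : List (List Int)) (n : Int) (out : List (List Int)) : Prop := out = clues_separated_by_one_alt puzzle n
instance (puzzle : List (List Int)) (n : Int) (out : List (List Int)) : Decidable (Spec_clues_separated_by_one puzzle n out) := by unfold Spec_clues_separated_by_one; infer_instance

-- ===== CLAIM (what is proved, stated in full; the proofs are below) =====
def Claim_equal_clues_separated_by_one : Prop := ∀ (puzzle : List (List Int)) (n : Int), Dom_clues_separated_by_one puzzle n → Pre_clues_separated_by_one puzzle n → Spec_clues_separated_by_one puzzle n (clues_separated_by_one puzzle n)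

-- ===== LEMMAS AND PROOFS =====

-- a grid with a set of (-1)-cells overwritten by 0; both programs are shown to compute such a grid
def pvApply (p : List (List Int)) (m : Int → Int → Bool) : List (List Int) :=
  p.mapIdx (fun r row => row.mapIdx (fun c v => if m (r : Int) (c : Int) then 0 else v))

def pvValid (p : List (List Int)) (m : Int → Int → Bool) : Prop :=
  ∀ r c : Int, m r c = true → pvGetC p r c = -1

def pvQH (p : List (List Int)) (r c : Int) : Bool :=
  decide (0 < pvGetC p r (c - 1)) && decide (0 < pvGetC p r (c + 1))

def pvQV (p : List (List Int)) (r c : Int) : Bool :=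
  decide (0 < pvGetC p (r - 1) c) && decide (0 < pvGetC p (r + 1) c)

def pvQB (p : List (List Int)) (n : Int) (r c : Int) : Bool :=
  (decide (0 < c ∧ c < n - 1) && pvQH p r c) || (decide (0 < r ∧ r < n - 1) && pvQV p r c)


theorem pvGetD_nonneg {α : Type} (xs : List α) (i : Int) (d : α) (h : 0 ≤ i) :
    PySem.List.pyGetD xs i d = xs.getD i.toNat d := by
  rw [PySem.List.pyGetD, PySem.List.pyGet?_of_nonneg xs h, List.getD_eq_getElem?_getD]

theorem pvApply_false (p : List (List Int)) : pvApply p (fun _ _ => false) = p := by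
  unfold pvApply
  apply List.ext_getElem (by simp)
  intro i h1 h2
  simp only [List.getElem_mapIdx, Bool.false_eq_true, if_false]
  apply List.ext_getElem (by simp)
  intro j g1 g2
  simp [List.getElem_mapIdx]

theorem pvApply_congr (p : List (List Int)) (m1 m2 : Int → Int → Bool)
    (h : ∀ r c : Nat, m1 r c = m2 r c) : pvApply p m1 = pvApply p m2 := by
  unfold pvApply
  apply List.ext_getElem (by simp)
  intro i h1 h2
  simp only [List.getElem_mapIdx]
  apply List.ext_getElem (by simp)
  intro j g1 g2
  simp only [List.getElem_mapIdx, h]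

theorem pvGetC_apply (p : List (List Int)) (m : Int → Int → Bool) (r c : Int)
    (hr : 0 ≤ r) (hc : 0 ≤ c) :
    pvGetC (pvApply p m) r c = if m r c then 0 else pvGetC p r c := by
  unfold pvGetC pvApply
  rw [pvGetD_nonneg _ _ _ hr, pvGetD_nonneg _ _ _ hr,
      pvGetD_nonneg _ _ _ hc, pvGetD_nonneg _ _ _ hc]
  simp only [List.getD_eq_getElem?_getD, List.getElem?_mapIdx]
  by_cases h1 : r.toNat < p.length
  · simp only [List.getElem?_eq_getElem h1, Option.map_some, Option.getD_some, List.getElem?_mapIdx]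
    by_cases h2 : c.toNat < p[r.toNat].length
    · simp only [List.getElem?_eq_getElem h2, Option.map_some, Option.getD_some,
        Int.toNat_of_nonneg hr, Int.toNat_of_nonneg hc]
    · simp only [List.getElem?_eq_none (by omega : p[r.toNat].length ≤ c.toNat),
        Option.map_none, Option.getD_none]
      split <;> rfl
  · simp only [List.getElem?_eq_none (by omega : p.length ≤ r.toNat),
      Option.map_none, Option.getD_none, List.getElem?_nil]
    split <;> rfl

theorem pvGetC_in_range (p : List (List Int)) (r c : Int) (hr : 0 ≤ r) (hc : 0 ≤ c)
    (hin : pvGetC p r c = -1) :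
    ∃ h1 : r.toNat < p.length, c.toNat < p[r.toNat].length := by
  unfold pvGetC at hin
  rw [pvGetD_nonneg _ _ _ hr, pvGetD_nonneg _ _ _ hc] at hin
  simp only [List.getD_eq_getElem?_getD] at hin
  by_cases h1 : r.toNat < p.length
  · refine ⟨h1, ?_⟩
    by_cases h2 : c.toNat < p[r.toNat].length
    · exact h2
    · exfalso
      rw [List.getElem?_eq_getElem h1] at hin
      simp only [Option.getD_some] at hin
      rw [List.getElem?_eq_none (by omega : p[r.toNat].length ≤ c.toNat)] at hin
      simp at hin
  · exfalso
    rw [List.getElem?_eq_none (by omega : p.length ≤ r.toNat)] at hin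
    simp at hin

theorem pvSetC_apply (p : List (List Int)) (m : Int → Int → Bool) (r c : Int)
    (hr : 0 ≤ r) (hc : 0 ≤ c) (hin : pvGetC p r c = -1) :
    pvSetC (pvApply p m) r c
      = pvApply p (fun r' c' => m r' c' || (decide (r' = r) && decide (c' = c))) := by
  obtain ⟨h1, h2⟩ := pvGetC_in_range p r c hr hc hin
  unfold pvSetC pvApply
  apply List.ext_getElem (by simp)
  intro i hi1 hi2
  rw [List.getElem_modify]
  by_cases hir : r.toNat = i
  · subst hir
    simp only [if_true, List.getElem_mapIdx]
    apply List.ext_getElem (by simp)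
    intro j hj1 hj2
    rw [List.getElem_set]
    simp only [List.getElem_mapIdx]
    by_cases hjc : c.toNat = j
    · subst hjc
      simp only [Int.toNat_of_nonneg hr, Int.toNat_of_nonneg hc,
        decide_true, Bool.and_true, Bool.or_true, if_true]
    · have : ¬ ((j : Int) = c) := by omega
      simp only [if_neg hjc, this, decide_false, Bool.and_false, Bool.or_false]
  · simp only [if_neg hir, List.getElem_mapIdx]
    have : ¬ ((i : Int) = r) := by omega
    simp only [this, decide_false, Bool.false_and, Bool.or_false]

theorem pvPass_char (p : List (List Int)) (S : List (List Int) → Int → Int → List (List Int))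
    (Q : Int → Int → Bool) :
    ∀ (L : List (Int × Int)), (∀ rc ∈ L, 0 ≤ rc.1 ∧ 0 ≤ rc.2) →
    (∀ m, pvValid p m → ∀ rc ∈ L,
        S (pvApply p m) rc.1 rc.2 =
          if (!(m rc.1 rc.2) && decide (pvGetC p rc.1 rc.2 = -1) && Q rc.1 rc.2) = true
          then pvApply p (fun r c => m r c || (decide (r = rc.1) && decide (c = rc.2)))
          else pvApply p m) →
    ∀ m, pvValid p m →
      L.foldl (fun g rc => S g rc.1 rc.2) (pvApply p m)
        = pvApply p (fun r c =>
            m r c || (decide ((r, c) ∈ L) && decide (pvGetC p r c = -1) && Q r c)) := by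
  intro L
  induction L with
  | nil =>
    intro _ _ m hm
    simp only [List.foldl_nil]
    apply pvApply_congr
    intro r c
    simp
  | cons a t ih =>
    intro hL hS m hm
    simp only [List.foldl_cons]
    rw [hS m hm a (List.mem_cons_self)]
    by_cases hb : (!(m a.1 a.2) && decide (pvGetC p a.1 a.2 = -1) && Q a.1 a.2) = true
    · rw [if_pos hb]
      simp only [Bool.and_eq_true, Bool.not_eq_eq_eq_not, Bool.not_true, decide_eq_true_eq] at hb
      obtain ⟨⟨hma, hown⟩, hQ⟩ := hb
      have hm1 : pvValid p (fun r c => m r c || (decide (r = a.1) && decide (c = a.2))) := by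
        intro r c h
        simp only [Bool.or_eq_true, Bool.and_eq_true, decide_eq_true_eq] at h
        rcases h with h | ⟨h1, h2⟩
        · exact hm r c h
        · subst h1; subst h2; exact hown
      rw [ih (fun rc hrc => hL rc (List.mem_cons_of_mem a hrc))
          (fun m' hm' rc hrc => hS m' hm' rc (List.mem_cons_of_mem a hrc)) _ hm1]
      apply pvApply_congr
      intro r c
      by_cases hra : (r : Int) = a.1 ∧ (c : Int) = a.2
      · obtain ⟨h1, h2⟩ := hra
        rw [Bool.eq_iff_iff]
        simp [List.mem_cons, h1, h2, hown, hQ]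
      · have hpair : ¬ ((r : Int), (c : Int)) = a := by
          intro h; apply hra; cases a; cases h; exact ⟨rfl, rfl⟩
        rw [Bool.eq_iff_iff]
        simp only [List.mem_cons, Bool.or_eq_true, Bool.and_eq_true, decide_eq_true_eq]
        simp [hpair, hra]
    · rw [if_neg hb]
      rw [ih (fun rc hrc => hL rc (List.mem_cons_of_mem a hrc))
          (fun m' hm' rc hrc => hS m' hm' rc (List.mem_cons_of_mem a hrc)) _ hm]
      apply pvApply_congr
      intro r c
      by_cases hpair : ((r : Int), (c : Int)) = a
      · have e1 : (r : Int) = a.1 := by rw [← hpair]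
        have e2 : (c : Int) = a.2 := by rw [← hpair]
        rw [e1, e2, Bool.eq_iff_iff]
        simp only [List.mem_cons, Bool.or_eq_true, Bool.and_eq_true, decide_eq_true_eq]
        by_cases hm0 : m a.1 a.2 = true
        · simp [hm0]
        · by_cases hown0 : pvGetC p a.1 a.2 = -1
          · have hmf : m a.1 a.2 = false := by simpa using hm0
            have hQF : ¬ Q a.1 a.2 = true := by
              intro hq; apply hb
              simp [hmf, hown0, hq]
            simp [hQF, hown0]
          · simp [hown0]
      · rw [Bool.eq_iff_iff]
        simp [List.mem_cons, hpair]

theorem pvClueAt_eq (p : List (List Int)) (n : Int) (r c : Int)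
    (h0r : 0 ≤ r) (hrn : r < n) (h0c : 0 ≤ c) (hcn : c < n) :
    pvClueAt (pvClueGrid p n) r c = decide (0 < pvGetC p r c) := by
  unfold pvClueAt pvClueGrid pvGetC
  rw [PySem.List.slice_to _ (by omega : (0:Int) ≤ n)]
  rw [pvGetD_nonneg _ _ _ h0r, pvGetD_nonneg _ _ _ h0r,
      pvGetD_nonneg _ _ _ h0c, pvGetD_nonneg _ _ _ h0c]
  simp only [List.getD_eq_getElem?_getD, List.getElem?_map, List.getElem?_take]
  rw [if_pos (by omega : r.toNat < n.toNat)]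
  by_cases h1 : r.toNat < p.length
  · simp only [List.getElem?_eq_getElem h1, Option.map_some, Option.getD_some]
    rw [PySem.List.slice_to _ (by omega : (0:Int) ≤ n)]
    simp only [List.getElem?_map, List.getElem?_take]
    rw [if_pos (by omega : c.toNat < n.toNat)]
    by_cases h2 : c.toNat < p[r.toNat].length
    · simp only [List.getElem?_eq_getElem h2, Option.map_some, Option.getD_some]
    · simp only [List.getElem?_eq_none (by omega : p[r.toNat].length ≤ c.toNat),
        Option.map_none, Option.getD_none]
      simp
  · simp only [List.getElem?_eq_none (by omega : p.length ≤ r.toNat),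
      Option.map_none, Option.getD_none, List.getElem?_nil]
    simp

theorem pvIte_pos_iff (p : List (List Int)) (m : Int → Int → Bool) (hm : pvValid p m)
    (r c : Int) (hr : 0 ≤ r) (hc : 0 ≤ c) :
    (0 < pvGetC (pvApply p m) r c) ↔ (0 < pvGetC p r c) := by
  rw [pvGetC_apply p m r c hr hc]
  by_cases h : m r c = true
  · rw [if_pos h, hm r c h]; omega
  · rw [if_neg h]

theorem pvSH_step (p : List (List Int)) (m : Int → Int → Bool) (hm : pvValid p m)
    (r c : Int) (hr : 0 ≤ r) (hc : 1 ≤ c) :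
    (if pvGetC (pvApply p m) r c = -1 then
       if 0 < pvGetC (pvApply p m) r (c - 1) ∧ 0 < pvGetC (pvApply p m) r (c + 1) then
         pvSetC (pvApply p m) r c
       else pvApply p m
     else pvApply p m)
      = if (!(m r c) && decide (pvGetC p r c = -1) && pvQH p r c) = true
        then pvApply p (fun r' c' => m r' c' || (decide (r' = r) && decide (c' = c)))
        else pvApply p m := by
  by_cases h0 : m r c = true
  · rw [pvGetC_apply p m r c hr (by omega), if_pos h0]
    simp [h0]
  · rw [pvGetC_apply p m r c hr (by omega), if_neg h0]
    by_cases hown : pvGetC p r c = -1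
    · rw [if_pos hown]
      have e : (0 < pvGetC (pvApply p m) r (c - 1) ∧ 0 < pvGetC (pvApply p m) r (c + 1)) ↔
            (pvQH p r c = true) := by
        rw [pvIte_pos_iff p m hm r (c - 1) hr (by omega),
            pvIte_pos_iff p m hm r (c + 1) hr (by omega)]
        simp [pvQH]
      by_cases hq : pvQH p r c = true
      · rw [if_pos (e.mpr hq), if_pos (by simp [h0, hown, hq]),
            pvSetC_apply p m r c hr (by omega) hown]
      · rw [if_neg (fun h => hq (e.mp h)), if_neg (by simp [hq])]
    · rw [if_neg hown, if_neg (by simp [hown])]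

theorem pvSV_step (p : List (List Int)) (m : Int → Int → Bool) (hm : pvValid p m)
    (r c : Int) (hr : 1 ≤ r) (hc : 0 ≤ c) :
    (if pvGetC (pvApply p m) r c = -1 then
       if 0 < pvGetC (pvApply p m) (r - 1) c ∧ 0 < pvGetC (pvApply p m) (r + 1) c then
         pvSetC (pvApply p m) r c
       else pvApply p m
     else pvApply p m)
      = if (!(m r c) && decide (pvGetC p r c = -1) && pvQV p r c) = true
        then pvApply p (fun r' c' => m r' c' || (decide (r' = r) && decide (c' = c)))
        else pvApply p m := by
  by_cases h0 : m r c = true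
  · rw [pvGetC_apply p m r c (by omega) hc, if_pos h0]
    simp [h0]
  · rw [pvGetC_apply p m r c (by omega) hc, if_neg h0]
    by_cases hown : pvGetC p r c = -1
    · rw [if_pos hown]
      have e : (0 < pvGetC (pvApply p m) (r - 1) c ∧ 0 < pvGetC (pvApply p m) (r + 1) c) ↔
            (pvQV p r c = true) := by
        rw [pvIte_pos_iff p m hm (r - 1) c (by omega) hc,
            pvIte_pos_iff p m hm (r + 1) c (by omega) hc]
        simp [pvQV]
      by_cases hq : pvQV p r c = true
      · rw [if_pos (e.mpr hq), if_pos (by simp [h0, hown, hq]),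
            pvSetC_apply p m r c (by omega) hc hown]
      · rw [if_neg (fun h => hq (e.mp h)), if_neg (by simp [hq])]
    · rw [if_neg hown, if_neg (by simp [hown])]

theorem pvSB_step (p : List (List Int)) (n : Int) (m : Int → Int → Bool) (_hm : pvValid p m)
    (r c : Int) (hr : 0 ≤ r) (hrn : r < n) (hc : 0 ≤ c) (hcn : c < n) :
    (if pvGetC (pvApply p m) r c = -1 ∧
        ((0 < c ∧ c < n - 1 ∧ pvClueAt (pvClueGrid p n) r (c - 1) ∧ pvClueAt (pvClueGrid p n) r (c + 1)) ∨
         (0 < r ∧ r < n - 1 ∧ pvClueAt (pvClueGrid p n) (r - 1) c ∧ pvClueAt (pvClueGrid p n) (r + 1) c))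
     then pvSetC (pvApply p m) r c else pvApply p m)
      = if (!(m r c) && decide (pvGetC p r c = -1) && pvQB p n r c) = true
        then pvApply p (fun r' c' => m r' c' || (decide (r' = r) && decide (c' = c)))
        else pvApply p m := by
  have hH : (0 < c ∧ c < n - 1 ∧ pvClueAt (pvClueGrid p n) r (c - 1) = true ∧
              pvClueAt (pvClueGrid p n) r (c + 1) = true)
      ↔ ((decide (0 < c ∧ c < n - 1) && pvQH p r c) = true) := by
    by_cases hb : 0 < c ∧ c < n - 1
    · rw [pvClueAt_eq p n r (c - 1) hr hrn (by omega) (by omega),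
          pvClueAt_eq p n r (c + 1) hr hrn (by omega) (by omega)]
      simp [hb, pvQH]
    · simp [hb]
      intro h1 h2; exact absurd ⟨h1, h2⟩ hb
  have hV : (0 < r ∧ r < n - 1 ∧ pvClueAt (pvClueGrid p n) (r - 1) c = true ∧
              pvClueAt (pvClueGrid p n) (r + 1) c = true)
      ↔ ((decide (0 < r ∧ r < n - 1) && pvQV p r c) = true) := by
    by_cases hb : 0 < r ∧ r < n - 1
    · rw [pvClueAt_eq p n (r - 1) c (by omega) (by omega) hc hcn,
          pvClueAt_eq p n (r + 1) c (by omega) (by omega) hc hcn]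
      simp [hb, pvQV]
    · simp [hb]
      intro h1 h2; exact absurd ⟨h1, h2⟩ hb
  rw [pvGetC_apply p m r c hr hc]
  by_cases h0 : m r c = true
  · rw [if_neg (by simp [h0]), if_neg (by simp [h0])]
  · rw [if_neg h0]
    by_cases hown : pvGetC p r c = -1
    · have e : ((0 < c ∧ c < n - 1 ∧ pvClueAt (pvClueGrid p n) r (c - 1) = true ∧
                  pvClueAt (pvClueGrid p n) r (c + 1) = true) ∨
                (0 < r ∧ r < n - 1 ∧ pvClueAt (pvClueGrid p n) (r - 1) c = true ∧
                  pvClueAt (pvClueGrid p n) (r + 1) c = true)) ↔ (pvQB p n r c = true) := by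
        rw [hH, hV, pvQB]
        simp
      by_cases hq : pvQB p n r c = true
      · rw [if_pos ⟨hown, e.mpr hq⟩, if_pos (by simp [h0, hown, hq]),
            pvSetC_apply p m r c hr hc hown]
      · rw [if_neg (fun h => hq (e.mp h.2)), if_neg (by simp [hq])]
    · rw [if_neg (fun h => hown h.1), if_neg (by simp [hown])]

theorem pvNested {σ : Type} (S : σ → Int → Int → σ) (xs ys : List Int) (init : σ)
    (f : Int → Int → Int × Int) :
    xs.foldl (fun g x => ys.foldl (fun g y => S g (f x y).1 (f x y).2) g) init
      = (xs.flatMap (fun x => ys.map (f x))).foldl (fun g rc => S g rc.1 rc.2) init := by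
  induction xs generalizing init with
  | nil => rfl
  | cons a t ih =>
    simp only [List.foldl_cons, List.flatMap_cons, List.foldl_append, List.foldl_map, ih]

theorem pvValid_false (p : List (List Int)) : pvValid p (fun _ _ => false) := by
  intro r c h; simp at h

theorem pvValid_mark0 (p : List (List Int)) (X Q : Int → Int → Bool) :
    pvValid p (fun r c => X r c && decide (pvGetC p r c = -1) && Q r c) := by
  intro r c h
  simp only [Bool.and_eq_true, decide_eq_true_eq] at h
  exact h.1.2

theorem pvPassA2 (p : List (List Int)) (n : Int) (m : Int → Int → Bool) (hm : pvValid p m) :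
    (PySem.List.pyRange 0 n 1).foldl (fun g col =>
      (PySem.List.pyRange 1 (n - 1) 1).foldl (fun g row =>
        if pvGetC g row col = -1 then
          if 0 < pvGetC g (row - 1) col ∧ 0 < pvGetC g (row + 1) col then pvSetC g row col else g
        else g) g) (pvApply p m)
      = pvApply p (fun r c => m r c ||
          (decide ((r, c) ∈ (PySem.List.pyRange 0 n 1).flatMap (fun col =>
              (PySem.List.pyRange 1 (n - 1) 1).map (fun row => (row, col))))
            && decide (pvGetC p r c = -1) && pvQV p r c)) := by
  have hL : ∀ rc ∈ (PySem.List.pyRange 0 n 1).flatMap (fun col =>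
      (PySem.List.pyRange 1 (n - 1) 1).map (fun row => (row, col))), 0 ≤ rc.1 ∧ 0 ≤ rc.2 := by
    intro rc hrc
    simp only [List.mem_flatMap, List.mem_map, PySem.List.mem_pyRange_one] at hrc
    obtain ⟨col, hcol, row, hrow, e⟩ := hrc
    subst e; constructor <;> simp <;> omega
  have hS : ∀ m', pvValid p m' → ∀ rc ∈ (PySem.List.pyRange 0 n 1).flatMap (fun col =>
      (PySem.List.pyRange 1 (n - 1) 1).map (fun row => (row, col))),
      (fun g r c => if pvGetC g r c = -1 then
          if 0 < pvGetC g (r - 1) c ∧ 0 < pvGetC g (r + 1) c then pvSetC g r c else g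
        else g) (pvApply p m') rc.1 rc.2 =
        if (!(m' rc.1 rc.2) && decide (pvGetC p rc.1 rc.2 = -1) && pvQV p rc.1 rc.2) = true
        then pvApply p (fun r c => m' r c || (decide (r = rc.1) && decide (c = rc.2)))
        else pvApply p m' := by
    intro m' hm' rc hrc
    simp only [List.mem_flatMap, List.mem_map, PySem.List.mem_pyRange_one] at hrc
    obtain ⟨col, hcol, row, hrow, e⟩ := hrc
    subst e
    exact pvSV_step p m' hm' row col (by omega) (by omega)
  have h := pvPass_char p (fun g r c => if pvGetC g r c = -1 then
      if 0 < pvGetC g (r - 1) c ∧ 0 < pvGetC g (r + 1) c then pvSetC g r c else g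
    else g) (pvQV p) _ hL hS m hm
  exact (pvNested (fun g r c => if pvGetC g r c = -1 then
      if 0 < pvGetC g (r - 1) c ∧ 0 < pvGetC g (r + 1) c then pvSetC g r c else g
    else g) (PySem.List.pyRange 0 n 1) (PySem.List.pyRange 1 (n - 1) 1) (pvApply p m)
    (fun col row => (row, col))).trans h

theorem pvPassA1 (p : List (List Int)) (n : Int) :
    (PySem.List.pyRange 0 n 1).foldl (fun g row =>
      (PySem.List.pyRange 1 (n - 1) 1).foldl (fun g col =>
        if pvGetC g row col = -1 then
          if 0 < pvGetC g row (col - 1) ∧ 0 < pvGetC g row (col + 1) then pvSetC g row col else g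
        else g) g) p
      = pvApply p (fun r c =>
          decide ((r, c) ∈ (PySem.List.pyRange 0 n 1).flatMap (fun row =>
              (PySem.List.pyRange 1 (n - 1) 1).map (fun col => (row, col))))
            && decide (pvGetC p r c = -1) && pvQH p r c) := by
  have hL : ∀ rc ∈ (PySem.List.pyRange 0 n 1).flatMap (fun row =>
      (PySem.List.pyRange 1 (n - 1) 1).map (fun col => (row, col))), 0 ≤ rc.1 ∧ 0 ≤ rc.2 := by
    intro rc hrc
    simp only [List.mem_flatMap, List.mem_map, PySem.List.mem_pyRange_one] at hrc
    obtain ⟨row, hrow, col, hcol, e⟩ := hrc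
    subst e; constructor <;> simp <;> omega
  have hS : ∀ m', pvValid p m' → ∀ rc ∈ (PySem.List.pyRange 0 n 1).flatMap (fun row =>
      (PySem.List.pyRange 1 (n - 1) 1).map (fun col => (row, col))),
      (fun g r c => if pvGetC g r c = -1 then
          if 0 < pvGetC g r (c - 1) ∧ 0 < pvGetC g r (c + 1) then pvSetC g r c else g
        else g) (pvApply p m') rc.1 rc.2 =
        if (!(m' rc.1 rc.2) && decide (pvGetC p rc.1 rc.2 = -1) && pvQH p rc.1 rc.2) = true
        then pvApply p (fun r c => m' r c || (decide (r = rc.1) && decide (c = rc.2)))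
        else pvApply p m' := by
    intro m' hm' rc hrc
    simp only [List.mem_flatMap, List.mem_map, PySem.List.mem_pyRange_one] at hrc
    obtain ⟨row, hrow, col, hcol, e⟩ := hrc
    subst e
    exact pvSH_step p m' hm' row col (by omega) (by omega)
  have h := pvPass_char p (fun g r c => if pvGetC g r c = -1 then
      if 0 < pvGetC g r (c - 1) ∧ 0 < pvGetC g r (c + 1) then pvSetC g r c else g
    else g) (pvQH p) _ hL hS (fun _ _ => false) (pvValid_false p)
  have e0 : (PySem.List.pyRange 0 n 1).foldl (fun g row =>
      (PySem.List.pyRange 1 (n - 1) 1).foldl (fun g col =>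
        if pvGetC g row col = -1 then
          if 0 < pvGetC g row (col - 1) ∧ 0 < pvGetC g row (col + 1) then pvSetC g row col else g
        else g) g) p
      = (PySem.List.pyRange 0 n 1).foldl (fun g row =>
      (PySem.List.pyRange 1 (n - 1) 1).foldl (fun g col =>
        if pvGetC g row col = -1 then
          if 0 < pvGetC g row (col - 1) ∧ 0 < pvGetC g row (col + 1) then pvSetC g row col else g
        else g) g) (pvApply p (fun _ _ => false)) := by rw [pvApply_false]
  rw [e0, (pvNested (fun g r c => if pvGetC g r c = -1 then
      if 0 < pvGetC g r (c - 1) ∧ 0 < pvGetC g r (c + 1) then pvSetC g r c else g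
    else g) (PySem.List.pyRange 0 n 1) (PySem.List.pyRange 1 (n - 1) 1)
    (pvApply p (fun _ _ => false)) (fun row col => (row, col))).trans h]
  apply pvApply_congr
  intro r c
  simp

theorem pvPassB0 (p : List (List Int)) (n : Int) :
    (PySem.List.pyRange 0 n 1).foldl (fun g r =>
      (PySem.List.pyRange 0 n 1).foldl (fun g c =>
        if pvGetC g r c = -1 ∧
            ((0 < c ∧ c < n - 1 ∧ pvClueAt (pvClueGrid p n) r (c - 1) ∧ pvClueAt (pvClueGrid p n) r (c + 1)) ∨
             (0 < r ∧ r < n - 1 ∧ pvClueAt (pvClueGrid p n) (r - 1) c ∧ pvClueAt (pvClueGrid p n) (r + 1) c))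
        then pvSetC g r c else g) g) p
      = pvApply p (fun r c =>
          decide ((r, c) ∈ (PySem.List.pyRange 0 n 1).flatMap (fun r' =>
              (PySem.List.pyRange 0 n 1).map (fun c' => (r', c'))))
            && decide (pvGetC p r c = -1) && pvQB p n r c) := by
  have hL : ∀ rc ∈ (PySem.List.pyRange 0 n 1).flatMap (fun r' =>
      (PySem.List.pyRange 0 n 1).map (fun c' => (r', c'))), 0 ≤ rc.1 ∧ 0 ≤ rc.2 := by
    intro rc hrc
    simp only [List.mem_flatMap, List.mem_map, PySem.List.mem_pyRange_one] at hrc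
    obtain ⟨r', hr', c', hc', e⟩ := hrc
    subst e; constructor <;> simp <;> omega
  have hS : ∀ m', pvValid p m' → ∀ rc ∈ (PySem.List.pyRange 0 n 1).flatMap (fun r' =>
      (PySem.List.pyRange 0 n 1).map (fun c' => (r', c'))),
      (fun g r c =>
        if pvGetC g r c = -1 ∧
            ((0 < c ∧ c < n - 1 ∧ pvClueAt (pvClueGrid p n) r (c - 1) ∧ pvClueAt (pvClueGrid p n) r (c + 1)) ∨
             (0 < r ∧ r < n - 1 ∧ pvClueAt (pvClueGrid p n) (r - 1) c ∧ pvClueAt (pvClueGrid p n) (r + 1) c))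
        then pvSetC g r c else g) (pvApply p m') rc.1 rc.2 =
        if (!(m' rc.1 rc.2) && decide (pvGetC p rc.1 rc.2 = -1) && pvQB p n rc.1 rc.2) = true
        then pvApply p (fun r c => m' r c || (decide (r = rc.1) && decide (c = rc.2)))
        else pvApply p m' := by
    intro m' hm' rc hrc
    simp only [List.mem_flatMap, List.mem_map, PySem.List.mem_pyRange_one] at hrc
    obtain ⟨r', hr', c', hc', e⟩ := hrc
    subst e
    exact pvSB_step p n m' hm' r' c' (by omega) (by omega) (by omega) (by omega)
  have h := pvPass_char p (fun g r c =>
      if pvGetC g r c = -1 ∧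
          ((0 < c ∧ c < n - 1 ∧ pvClueAt (pvClueGrid p n) r (c - 1) ∧ pvClueAt (pvClueGrid p n) r (c + 1)) ∨
           (0 < r ∧ r < n - 1 ∧ pvClueAt (pvClueGrid p n) (r - 1) c ∧ pvClueAt (pvClueGrid p n) (r + 1) c))
      then pvSetC g r c else g) (pvQB p n) _ hL hS (fun _ _ => false) (pvValid_false p)
  refine ((congrArg (fun init => (PySem.List.pyRange 0 n 1).foldl (fun g r =>
      (PySem.List.pyRange 0 n 1).foldl (fun g c =>
        if pvGetC g r c = -1 ∧
            ((0 < c ∧ c < n - 1 ∧ pvClueAt (pvClueGrid p n) r (c - 1) ∧ pvClueAt (pvClueGrid p n) r (c + 1)) ∨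
             (0 < r ∧ r < n - 1 ∧ pvClueAt (pvClueGrid p n) (r - 1) c ∧ pvClueAt (pvClueGrid p n) (r + 1) c))
        then pvSetC g r c else g) g) init) (pvApply_false p)).symm.trans
    ((pvNested (fun g r c =>
      if pvGetC g r c = -1 ∧
          ((0 < c ∧ c < n - 1 ∧ pvClueAt (pvClueGrid p n) r (c - 1) ∧ pvClueAt (pvClueGrid p n) r (c + 1)) ∨
           (0 < r ∧ r < n - 1 ∧ pvClueAt (pvClueGrid p n) (r - 1) c ∧ pvClueAt (pvClueGrid p n) (r + 1) c))
      then pvSetC g r c else g) (PySem.List.pyRange 0 n 1) (PySem.List.pyRange 0 n 1)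
    (pvApply p (fun _ _ => false)) (fun r' c' => (r', c'))).trans h)).trans ?_
  apply pvApply_congr
  intro r c
  simp

theorem pvFoldl_id {σ α : Type} (l : List α) (init : σ) :
    l.foldl (fun s _ => s) init = init := by
  induction l generalizing init with
  | nil => rfl
  | cons a t ih => exact ih init

theorem pvMain (p : List (List Int)) (n : Int) :
    clues_separated_by_one p n = clues_separated_by_one_alt p n := by
  by_cases hn : 3 ≤ n
  · simp only [clues_separated_by_one, clues_separated_by_one_alt, if_pos hn]
    rw [pvPassA1 p n, pvPassA2 p n _ (pvValid_mark0 p _ _), pvPassB0 p n]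
    apply pvApply_congr
    intro r c
    rw [Bool.eq_iff_iff]
    simp only [Bool.or_eq_true, Bool.and_eq_true, decide_eq_true_eq, List.mem_flatMap,
      List.mem_map, PySem.List.mem_pyRange_one, Prod.mk.injEq, pvQB, pvQH, pvQV]
    constructor
    · rintro (⟨⟨⟨row, ⟨h1, h2⟩, col, ⟨h3, h4⟩, e1, e2⟩, hown⟩, hq1, hq2⟩ |
              ⟨⟨⟨col, ⟨h1, h2⟩, row, ⟨h3, h4⟩, e1, e2⟩, hown⟩, hq1, hq2⟩)
      · subst e1; subst e2
        exact ⟨⟨⟨(r : Int), ⟨by omega, by omega⟩, (c : Int), ⟨by omega, by omega⟩, rfl, rfl⟩, hown⟩,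
          Or.inl ⟨⟨by omega, by omega⟩, hq1, hq2⟩⟩
      · subst e1; subst e2
        exact ⟨⟨⟨(r : Int), ⟨by omega, by omega⟩, (c : Int), ⟨by omega, by omega⟩, rfl, rfl⟩, hown⟩,
          Or.inr ⟨⟨by omega, by omega⟩, hq1, hq2⟩⟩
    · rintro ⟨⟨⟨row, ⟨h1, h2⟩, col, ⟨h3, h4⟩, e1, e2⟩, hown⟩,
        ⟨⟨hb1, hb2⟩, hq1, hq2⟩ | ⟨⟨hb1, hb2⟩, hq1, hq2⟩⟩
      · subst e1; subst e2
        exact Or.inl ⟨⟨⟨(r : Int), ⟨by omega, by omega⟩, (c : Int), ⟨by omega, by omega⟩, rfl, rfl⟩,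
          hown⟩, hq1, hq2⟩
      · subst e1; subst e2
        exact Or.inr ⟨⟨⟨(c : Int), ⟨by omega, by omega⟩, (r : Int), ⟨by omega, by omega⟩, rfl, rfl⟩,
          hown⟩, hq1, hq2⟩
  · simp only [clues_separated_by_one, clues_separated_by_one_alt, if_neg hn]
    rw [PySem.List.pyRange_one_eq_nil (by omega : n - 1 ≤ 1)]
    simp only [List.foldl_nil, pvFoldl_id]

-- ===== VERDICT (by name: the statement is the Claim_ definition above) =====
theorem clues_separated_by_one_spec : Claim_equal_clues_separated_by_one := by
  intro puzzle n _ _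
  show clues_separated_by_one puzzle n = clues_separated_by_one_alt puzzle n
  exact pvMain puzzle n
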